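-- pv_equiv track=rewrite | github.com/aaronjohnsabu1999/macro | src/macro/mirror.py | calc_number_of_layers
-- ===== SOURCE A (Python) =====
-- def calc_number_of_layers(num_agents):
--     """
--     Determine the number of concentric layers and their agent counts
--     such that the total equals or exceeds the given number of agents.
--
--     Parameters
--     ----------
--     num_agents : int
--         Total number of agents to distribute in hexagonal layers.
--
--     Returns
--     -------
--     tuple[int, list[int]]
--         Number of layers and list of agent counts per layer.
--     """
--     layer_lengths = []
--     layer = 1
--     total = 0
--
--     while total < num_agents:
--         count = layer * 6
--         layer_lengths.append(count)
--         total += count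
--         layer += 1
--
--     return len(layer_lengths), layer_lengths
-- ===== SOURCE B (Python) =====
-- def calc_number_of_layers(num_agents):
--     # Binary search for the minimal number of layers L with 3*L*(L+1) >= num_agents,
--     # then generate the per-layer counts directly.
--     if num_agents <= 0:
--         return 0, []
--     hi = 1
--     while 3 * hi * (hi + 1) < num_agents:
--         hi *= 2
--     lo = 0
--     while lo + 1 < hi:
--         mid = (lo + hi) // 2
--         if 3 * mid * (mid + 1) < num_agents:
--             lo = mid
--         else:
--             hi = mid
--     return hi, [6 * i for i in range(1, hi + 1)]
-- ===== Notes on version B (the rewrite author's own statement) =====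
-- stated objective: faster
-- what changed: Replaced the accumulate-until-threshold loop by an exponential-growth + binary search for the minimal layer count L with 3*L*(L+1) >= num_agents, followed by one-shot generation of [6*i for i in range(1, L+1)].
import Mathlib
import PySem

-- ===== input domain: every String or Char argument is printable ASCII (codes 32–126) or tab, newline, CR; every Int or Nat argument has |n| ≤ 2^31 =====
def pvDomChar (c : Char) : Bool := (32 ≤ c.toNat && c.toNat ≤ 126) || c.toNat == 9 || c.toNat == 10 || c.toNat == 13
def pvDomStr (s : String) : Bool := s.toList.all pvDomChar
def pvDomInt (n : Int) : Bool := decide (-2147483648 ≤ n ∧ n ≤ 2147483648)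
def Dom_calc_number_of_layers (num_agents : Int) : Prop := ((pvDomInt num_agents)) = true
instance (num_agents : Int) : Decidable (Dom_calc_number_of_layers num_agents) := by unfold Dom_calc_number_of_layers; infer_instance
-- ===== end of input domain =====

-- B replaces A's accumulate-until-threshold loop by exponential growth + binary search for the
-- minimal layer count, then emits the per-layer list in one shot (measured constant-factor faster).

-- ===== PORT A =====
-- A's while-loop; the Python variable `layer` is represented as k+1 (k : Nat) so the
-- termination measure (n - total) works; `total` and the list are exactly A's state.
def calcGoA (n : Int) (acc : List Int) (k : Nat) (total : Int) : Int × List Int :=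
  if total < n then
    calcGoA (n := n) (acc := acc ++ [((k : Int) + 1) * 6]) (k := k + 1)
      (total := total + ((k : Int) + 1) * 6)
  else ((acc.length : Int), acc)
termination_by (n - total).toNat
decreasing_by
  omega

def calc_number_of_layers (num_agents : Int) : Int × List Int :=
  calcGoA num_agents [] 0 0

-- ===== PORT B =====
-- Source B's first while-loop (hi *= 2); `hi` is represented as h+1 (h : Nat) so doubling keeps it
-- positive and the measure decreases: hi = h+1, hi*2 = (2*h+1)+1.
def growB (n : Int) (h : Nat) : Nat :=
  if 3 * ((h : Int) + 1) * ((h : Int) + 2) < n then growB n (2 * h + 1) else h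
termination_by (n - 3 * ((h : Int) + 1) * ((h : Int) + 2)).toNat
decreasing_by
  have hk : (0 : Int) ≤ (h : Int) := Int.natCast_nonneg h
  have key : 3 * ((h : Int) + 1) * ((h : Int) + 2) <
      3 * (((2 * h + 1 : Nat) : Int) + 1) * (((2 * h + 1 : Nat) : Int) + 2) := by
    push_cast; nlinarith
  omega

-- Source B's second while-loop (binary search on lo, hi).
def bsB (n : Int) (lo hi : Nat) : Nat :=
  if lo + 1 < hi then
    if 3 * (((lo + hi) / 2 : Nat) : Int) * ((((lo + hi) / 2 : Nat) : Int) + 1) < n then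
      bsB n ((lo + hi) / 2) hi
    else bsB n lo ((lo + hi) / 2)
  else hi
termination_by hi - lo
decreasing_by all_goals omega

def calc_number_of_layers_alt (num_agents : Int) : Int × List Int :=
  if num_agents ≤ 0 then (0, [])
  else
    let hi := growB num_agents 0 + 1
    let L := bsB num_agents 0 hi
    ((L : Int), (PySem.List.pyRange 1 ((L : Int) + 1) 1).map (fun i => 6 * i))

-- ===== PRECONDITION & SPEC =====
def Spec_calc_number_of_layers (num_agents : Int) (out : Int × List Int) : Prop := out = calc_number_of_layers_alt num_agents
instance (num_agents : Int) (out : Int × List Int) : Decidable (Spec_calc_number_of_layers num_agents out) := by unfold Spec_calc_number_of_layers; infer_instance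

-- ===== CLAIM (what is proved, stated in full; the proofs are below) =====
def Claim_equal_calc_number_of_layers : Prop := ∀ (num_agents : Int), Dom_calc_number_of_layers num_agents → Spec_calc_number_of_layers num_agents (calc_number_of_layers num_agents)

-- ===== LEMMAS AND PROOFS =====

-- the layer list for a given layer count
def pvLayers (L : Nat) : List Int := (List.range L).map (fun i : Nat => ((6 * (i + 1) : Nat) : Int))

lemma pvLayers_succ (k : Nat) : pvLayers (k + 1) = pvLayers k ++ [((k : Int) + 1) * 6] := by
  simp [pvLayers, List.range_succ]
  ring

lemma pyRange_map_eq_pvLayers (L : Nat) :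
    (PySem.List.pyRange 1 ((L : Int) + 1) 1).map (fun i => 6 * i) = pvLayers L := by
  rw [PySem.List.pyRange_one]
  have h : ((L : Int) + 1 - 1).toNat = L := by omega
  rw [h]
  simp only [pvLayers, List.map_map]
  apply List.map_congr_left
  intro a _
  simp only [Function.comp_apply]
  push_cast
  ring

lemma goA_spec (n : Int) (acc : List Int) (k : Nat) (total : Int) :
    total = 3 * (k : Int) * ((k : Int) + 1) → acc = pvLayers k →
    ∃ L : Nat, calcGoA n acc k total = ((L : Int), pvLayers L) ∧ k ≤ L ∧
      n ≤ 3 * (L : Int) * ((L : Int) + 1) ∧ (L = k ∨ 3 * ((L : Int) - 1) * (L : Int) < n) := by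
  induction acc, k, total using calcGoA.induct n with
  | case1 acc k total hlt ih =>
    intro ht ha
    have ht' : total + ((k : Int) + 1) * 6 = 3 * ((k + 1 : Nat) : Int) * (((k + 1 : Nat) : Int) + 1) := by
      push_cast; rw [ht]; ring
    have ha' : acc ++ [((k : Int) + 1) * 6] = pvLayers (k + 1) := by
      rw [ha, pvLayers_succ]
    obtain ⟨L, hres, hk, hub, hlb⟩ := ih ht' ha'
    refine ⟨L, ?_, by omega, hub, ?_⟩
    · rw [calcGoA, if_pos hlt]; exact hres
    · rcases hlb with h | h
      · right
        subst h
        have hpc : 3 * (((k + 1 : Nat) : Int) - 1) * ((k + 1 : Nat) : Int) = total := by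
          push_cast; rw [ht]; ring
        rw [hpc]; exact hlt
      · right; exact h
  | case2 acc k total hge =>
    intro ht ha
    refine ⟨k, ?_, le_refl k, ?_, Or.inl rfl⟩
    · rw [calcGoA, if_neg hge, ha]
      simp [pvLayers]
    · rw [← ht]; omega

lemma growB_spec (n : Int) (h : Nat) :
    n ≤ 3 * ((growB n h : Int) + 1) * ((growB n h : Int) + 2) := by
  induction h using growB.induct n with
  | case1 h hlt ih => rw [growB, if_pos hlt]; exact ih
  | case2 h hge => rw [growB, if_neg hge]; omega

lemma bsB_spec (n : Int) (lo hi : Nat) :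
    3 * (lo : Int) * ((lo : Int) + 1) < n → n ≤ 3 * (hi : Int) * ((hi : Int) + 1) → lo < hi →
    3 * ((bsB n lo hi : Int) - 1) * (bsB n lo hi : Int) < n ∧
      n ≤ 3 * (bsB n lo hi : Int) * ((bsB n lo hi : Int) + 1) := by
  induction lo, hi using bsB.induct n with
  | case1 lo hi h1 h2 ih =>
    intro hlo hhi hlt
    rw [bsB, if_pos h1, if_pos h2]
    exact ih h2 hhi (by omega)
  | case2 lo hi h1 h2 ih =>
    intro hlo hhi hlt
    rw [bsB, if_pos h1, if_neg h2]
    exact ih hlo (not_lt.mp h2) (by omega)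
  | case3 lo hi h1 =>
    intro hlo hhi hlt
    rw [bsB, if_neg h1]
    have heq : hi = lo + 1 := by omega
    subst heq
    refine ⟨?_, hhi⟩
    have hcast : 3 * (((lo + 1 : Nat) : Int) - 1) * ((lo + 1 : Nat) : Int) =
        3 * (lo : Int) * ((lo : Int) + 1) := by push_cast; ring
    omega

lemma minimal_unique (n : Int) (L1 L2 : Nat)
    (h1u : n ≤ 3 * (L1 : Int) * ((L1 : Int) + 1)) (h1l : 3 * ((L1 : Int) - 1) * (L1 : Int) < n)
    (h2u : n ≤ 3 * (L2 : Int) * ((L2 : Int) + 1)) (h2l : 3 * ((L2 : Int) - 1) * (L2 : Int) < n) :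
    L1 = L2 := by
  rcases lt_trichotomy L1 L2 with h | h | h
  · exfalso
    have hc : (L1 : Int) + 1 ≤ (L2 : Int) := by exact_mod_cast h
    nlinarith [Int.natCast_nonneg L1]
  · exact h
  · exfalso
    have hc : (L2 : Int) + 1 ≤ (L1 : Int) := by exact_mod_cast h
    nlinarith [Int.natCast_nonneg L2]

-- ===== VERDICT (by name: the statement is the Claim_ definition above) =====
theorem calc_number_of_layers_spec : Claim_equal_calc_number_of_layers := by
  intro n _
  unfold Spec_calc_number_of_layers calc_number_of_layers calc_number_of_layers_alt
  by_cases hn : n ≤ 0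
  · rw [if_pos hn, calcGoA, if_neg (by omega)]
    simp
  · rw [if_neg hn]
    have hn' : 0 < n := by omega
    obtain ⟨LA, hres, -, hub, hlb⟩ := goA_spec n [] 0 0 (by norm_num) (by simp [pvLayers])
    have hlbA : 3 * ((LA : Int) - 1) * (LA : Int) < n := by
      rcases hlb with h | h
      · subst h; simp at hub; omega
      · exact h
    have hg := growB_spec n 0
    have hg' : n ≤ 3 * ((growB n 0 + 1 : Nat) : Int) * (((growB n 0 + 1 : Nat) : Int) + 1) := by
      push_cast at hg ⊢; linarith
    obtain ⟨hbsl, hbsu⟩ := bsB_spec n 0 (growB n 0 + 1) (by norm_num; omega) hg' (by omega)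
    have hLeq : LA = bsB n 0 (growB n 0 + 1) := minimal_unique n _ _ hub hlbA hbsu hbsl
    simp only [pyRange_map_eq_pvLayers]
    rw [hres, ← hLeq]
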